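-- pv_equiv track=rewrite | github.com/nanozoo/GTF2NCBIGFF3 | gtf_to_ncbi_gff3.py | compute_cds_phases
-- ===== SOURCE A (Python) =====
-- def compute_cds_phases(segments):
--     """Compute phase for inferred CDS segments (transcription order)."""
--     phases = []
--     offset = 0
--     for (s,e) in segments:
--         length = e - s + 1
--         phase = offset % 3
--         phases.append(str(phase))
--         offset += length
--     return phases
-- ===== SOURCE B (Python) =====
-- def compute_cds_phases(segments):
--     """Compute phase for inferred CDS segments (transcription order)."""
--     return [str(sum(e - s + 1 for (s, e) in segments[:i]) % 3)
--             for i in range(len(segments))]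
-- ===== Notes on version B (the rewrite author's own statement) =====
-- stated objective: alternative
-- what changed: Replaces A's accumulator-threading loop (running offset mutated across iterations) with a stateless per-index comprehension: phase i is computed directly as the sum of lengths of segments[:i] modulo 3.
import Mathlib
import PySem

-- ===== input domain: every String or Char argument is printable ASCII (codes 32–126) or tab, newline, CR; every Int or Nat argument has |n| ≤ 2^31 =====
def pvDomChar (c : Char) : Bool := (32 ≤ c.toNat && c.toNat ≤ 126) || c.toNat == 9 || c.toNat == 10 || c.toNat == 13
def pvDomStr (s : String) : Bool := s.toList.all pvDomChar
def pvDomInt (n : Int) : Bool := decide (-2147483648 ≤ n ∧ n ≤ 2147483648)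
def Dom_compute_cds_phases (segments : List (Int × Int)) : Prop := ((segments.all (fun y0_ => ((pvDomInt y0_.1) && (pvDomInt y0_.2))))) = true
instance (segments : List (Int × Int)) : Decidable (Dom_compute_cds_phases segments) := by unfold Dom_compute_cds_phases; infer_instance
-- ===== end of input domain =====

-- B replaces A's running-offset accumulator loop by a stateless per-index
-- comprehension (phase i = sum of lengths of segments[:i], mod 3); alternative
-- decomposition, not faster.

-- ===== PORT A =====
-- A: phases = []; offset = 0; for (s,e) in segments: append str(offset % 3); offset += e - s + 1
def compute_cds_phases (segments : List (Int × Int)) : List String :=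
  (segments.foldl
    (fun (st : List String × Int) (p : Int × Int) =>
      (st.1 ++ [PySem.Int.toStr (PySem.Int.mod st.2 3)], st.2 + (p.2 - p.1 + 1)))
    ([], 0)).1

-- ===== PORT B =====
-- B: [str(sum(e - s + 1 for (s, e) in segments[:i]) % 3) for i in range(len(segments))]
def compute_cds_phases_alt (segments : List (Int × Int)) : List String :=
  (PySem.List.pyRange 0 (segments.length : Int) 1).map
    (fun i =>
      PySem.Int.toStr (PySem.Int.mod
        (((PySem.List.slice segments none (some i)).map (fun p => p.2 - p.1 + 1)).sum) 3))

-- ===== PRECONDITION & SPEC =====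
def Spec_compute_cds_phases (segments : List (Int × Int)) (out : List String) : Prop := out = compute_cds_phases_alt segments
instance (segments : List (Int × Int)) (out : List String) : Decidable (Spec_compute_cds_phases segments out) := by unfold Spec_compute_cds_phases; infer_instance

-- ===== CLAIM (what is proved, stated in full; the proofs are below) =====
def Claim_equal_compute_cds_phases : Prop := ∀ (segments : List (Int × Int)), Dom_compute_cds_phases segments → Spec_compute_cds_phases segments (compute_cds_phases segments)

-- ===== LEMMAS AND PROOFS =====

-- A's loop, run from any initial phases list and offset, produces one entry per
-- index k: the string of (offset + sum of the first k lengths) mod 3.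
lemma loopA (l : List (Int × Int)) (ph : List String) (off : Int) :
    (l.foldl
      (fun (st : List String × Int) (p : Int × Int) =>
        (st.1 ++ [PySem.Int.toStr (PySem.Int.mod st.2 3)], st.2 + (p.2 - p.1 + 1)))
      (ph, off)).1
    = ph ++ (List.range l.length).map
        (fun k => PySem.Int.toStr (PySem.Int.mod
          (off + ((l.take k).map (fun p => p.2 - p.1 + 1)).sum) 3)) := by
  induction l generalizing ph off with
  | nil => simp
  | cons p ls ih =>
      simp only [List.foldl_cons, List.length_cons, List.range_succ_eq_map]
      rw [ih]
      simp [List.map_map, Function.comp_def, List.append_assoc, add_assoc, add_comm, add_left_comm]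

lemma alt_eq (segments : List (Int × Int)) :
    compute_cds_phases_alt segments
    = (List.range segments.length).map
        (fun k => PySem.Int.toStr (PySem.Int.mod
          (((segments.take k).map (fun p => p.2 - p.1 + 1)).sum) 3)) := by
  unfold compute_cds_phases_alt
  rw [PySem.List.pyRange_zero_natCast]
  rw [List.map_map]
  refine List.map_congr_left (fun k hk => ?_)
  simp only [Function.comp_def]
  rw [PySem.List.slice_to_natCast]

-- ===== VERDICT (by name: the statement is the Claim_ definition above) =====
theorem compute_cds_phases_spec : Claim_equal_compute_cds_phases := by
  intro segments _
  unfold Spec_compute_cds_phases compute_cds_phases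
  rw [loopA, alt_eq]
  simp
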